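-- pv_equiv track=rewrite | github.com/crfield18/PhD-scripts | pymol/align_models.py | get_unique_models
-- ===== SOURCE A (Python) =====
-- def get_unique_models(model_list:list, top_x:int=25):
--     # Used for checking duplicates
--     unique_model_set = set()
--     unique_model_list = []
--
--     # Create a list of unique PDB codes ordered by their TMalign score
--     for m in model_list:
--         if len(unique_model_list) < top_x:
--             # Could check for duplicates of first 2 letters of pdb code to find proteins from different sources
--             if m.split('-')[0] not in unique_model_set:
--                 unique_model_set.add(m.split('-')[0])
--                 unique_model_list.append(m)
--         else:
--             break
--
--     return unique_model_list
-- ===== SOURCE B (Python) =====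
-- def get_unique_models(model_list: list, top_x: int = 25):
--     # Two phases: dedup the whole list by prefix key (first occurrence wins),
--     # then take the first top_x of the deduplicated models.
--     if top_x <= 0:
--         return []
--     seen = {}
--     for m in model_list:
--         k = m.split('-')[0]
--         if k not in seen:
--             seen[k] = m
--     return list(seen.values())[:top_x]
-- ===== Notes on version B (the rewrite author's own statement) =====
-- stated objective: alternative
-- what changed: Replaces the fused loop (in-loop length bound + early break + parallel set/list) with two phases: an order-preserving dict deduplicating the whole list by prefix key, then a [:top_x] slice guarded for top_x <= 0.
import Mathlib
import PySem

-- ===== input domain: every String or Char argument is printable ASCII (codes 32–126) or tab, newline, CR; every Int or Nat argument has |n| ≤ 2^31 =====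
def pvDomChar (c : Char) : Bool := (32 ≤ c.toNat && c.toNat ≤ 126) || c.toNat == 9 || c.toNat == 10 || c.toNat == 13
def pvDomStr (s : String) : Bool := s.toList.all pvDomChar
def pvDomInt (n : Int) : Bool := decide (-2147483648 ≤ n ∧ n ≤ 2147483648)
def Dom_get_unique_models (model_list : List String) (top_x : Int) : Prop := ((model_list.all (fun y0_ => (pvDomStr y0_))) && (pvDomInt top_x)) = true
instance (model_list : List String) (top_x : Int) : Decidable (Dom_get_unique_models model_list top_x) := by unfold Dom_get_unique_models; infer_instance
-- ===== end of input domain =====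

-- B changes the decomposition: one dict-based dedup pass over the whole list, then a slice — no speed claim.

-- m.split('-')[0]  (split with a nonempty separator always yields a nonempty list, so index 0 succeeds)
def pvKey (m : String) : String :=
  (PySem.List.pyGet? ((PySem.Str.split? m "-").getD []) 0).getD ""

-- ===== PORT A =====
def pvGoA (top_x : Int) : List String → PySem.Set String → List String → List String
  | [], _, acc => acc
  | m :: rest, s, acc =>
    if (acc.length : Int) < top_x then
      if PySem.Set.contains s (pvKey m) = false then
        pvGoA top_x rest (PySem.Set.add s (pvKey m)) (acc ++ [m])
      else
        pvGoA top_x rest s acc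
    else acc

def get_unique_models (model_list : List String) (top_x : Int) : List String :=
  pvGoA top_x model_list PySem.Set.empty []

-- ===== PORT B =====
def pvSeen (model_list : List String) : PySem.Dict String String :=
  model_list.foldl
    (fun d m => if d.contains (pvKey m) then d else d.insert (pvKey m) m)
    PySem.Dict.empty

def get_unique_models_alt (model_list : List String) (top_x : Int) : List String :=
  if top_x ≤ 0 then []
  else PySem.List.slice (pvSeen model_list).values none (some top_x)

-- ===== PRECONDITION & SPEC =====
def Spec_get_unique_models (model_list : List String) (top_x : Int) (out : List String) : Prop := out = get_unique_models_alt model_list top_x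
instance (model_list : List String) (top_x : Int) (out : List String) : Decidable (Spec_get_unique_models model_list top_x out) := by unfold Spec_get_unique_models; infer_instance

-- ===== CLAIM (what is proved, stated in full; the proofs are below) =====
def Claim_equal_get_unique_models : Prop := ∀ (model_list : List String) (top_x : Int), Dom_get_unique_models model_list top_x → Spec_get_unique_models model_list top_x (get_unique_models model_list top_x)

-- ===== LEMMAS AND PROOFS =====

-- B's dict only grows by appending (we never insert an existing key), so its values list
-- only ever extends on the right.
theorem pvSeen_values_prefix (ms : List String) (d : PySem.Dict String String) :
    d.values <+:
      (ms.foldl (fun d m => if d.contains (pvKey m) then d else d.insert (pvKey m) m) d).values := by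
  induction ms generalizing d with
  | nil => simp
  | cons m rest ih =>
    simp only [List.foldl_cons]
    by_cases h : d.contains (pvKey m)
    · simpa [h] using ih d
    · refine List.IsPrefix.trans ?_ (by simpa [h] using ih (d.insert (pvKey m) m))
      simp [PySem.Dict.values,
        PySem.Dict.items_insert_of_not_contains d m (Bool.eq_false_iff.mpr h)]

-- Main invariant: A's state (set, list) is (keys, values) of B's dict.
theorem pvGoA_eq (top_x : Int) (ms : List String) (d : PySem.Dict String String)
    (hsz : (d.size : Int) ≤ top_x) :
    pvGoA top_x ms d.keys d.values =
      ((ms.foldl (fun d m => if d.contains (pvKey m) then d else d.insert (pvKey m) m) d).values).take top_x.toNat := by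
  induction ms generalizing d with
  | nil =>
    have hlen : d.values.length = d.size := by simp [PySem.Dict.values, PySem.Dict.size]
    simp only [pvGoA, List.foldl_nil]
    exact (List.take_of_length_le (by omega)).symm
  | cons m rest ih =>
    have hlen : d.values.length = d.size := by simp [PySem.Dict.values, PySem.Dict.size]
    simp only [pvGoA, List.foldl_cons]
    by_cases hlt : (d.values.length : Int) < top_x
    · rw [if_pos hlt]
      by_cases hc : d.contains (pvKey m)
      · have hset : PySem.Set.contains d.keys (pvKey m) = true := by
          rw [PySem.Set.contains_iff]
          exact (PySem.Dict.contains_iff_mem_keys d _).mp hc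
        rw [if_neg (by rw [hset]; simp), if_pos hc]
        exact ih d hsz
      · have hset : PySem.Set.contains d.keys (pvKey m) = false := by
          rw [Bool.eq_false_iff, Ne, PySem.Set.contains_iff]
          exact fun hm => hc ((PySem.Dict.contains_iff_mem_keys d _).mpr hm)
        rw [if_pos hset]
        have hcf : d.contains (pvKey m) = false := by
          cases hx : d.contains (pvKey m)
          · rfl
          · exact absurd hx hc
        have hkeys : PySem.Set.add d.keys (pvKey m) = (d.insert (pvKey m) m).keys := by
          rw [PySem.Dict.keys_insert_of_not_contains d m hcf]
          simp [PySem.Set.add]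
          exact fun hm => hc ((PySem.Dict.contains_iff_mem_keys d _).mpr hm)
        have hvals : d.values ++ [m] = (d.insert (pvKey m) m).values := by
          simp [PySem.Dict.values,
            PySem.Dict.items_insert_of_not_contains d m hcf]
        rw [hkeys, hvals, if_neg (by simp [hc])]
        exact ih (d.insert (pvKey m) m)
          (by rw [PySem.Dict.size_insert]; simp [hc]; omega)
    · rw [if_neg hlt]
      obtain ⟨t, ht⟩ := pvSeen_values_prefix (m :: rest) d
      simp only [List.foldl_cons] at ht
      rw [← ht, List.take_append,
          List.take_of_length_le (by omega),
          List.take_eq_nil_iff.mpr (Or.inl (by omega)), List.append_nil]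

-- Degenerate bound: with top_x ≤ 0 A's loop exits at once.
theorem pvGoA_nonpos (top_x : Int) (h : top_x ≤ 0) (ms : List String) :
    pvGoA top_x ms PySem.Set.empty [] = [] := by
  cases ms with
  | nil => rfl
  | cons m rest => simp [pvGoA]; omega

-- ===== VERDICT (by name: the statement is the Claim_ definition above) =====
theorem get_unique_models_spec : Claim_equal_get_unique_models := by
  intro model_list top_x _
  unfold Spec_get_unique_models get_unique_models get_unique_models_alt pvSeen
  by_cases h : top_x ≤ 0
  · rw [if_pos h, pvGoA_nonpos top_x h]
  · rw [if_neg h]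
    have h0 : (0 : Int) ≤ top_x := by omega
    have heq := pvGoA_eq top_x model_list PySem.Dict.empty (by simp [PySem.Dict.size, PySem.Dict.empty]; omega)
    rw [show (PySem.Dict.empty : PySem.Dict String String).keys = PySem.Set.empty by rfl,
        show (PySem.Dict.empty : PySem.Dict String String).values = [] by rfl] at heq
    rw [heq, ← Int.toNat_of_nonneg h0, PySem.List.slice_to_natCast]
    simp
    omega
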